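-- pv_equiv track=rewrite | github.com/ericmerle3789/Collatz-Junction-Theorem | scripts/research/r21_weight_imbalance.py | generate_B_nondecreasing
-- ===== SOURCE A (Python) =====
-- from math import comb, gcd, log, log2, ceil, floor, sqrt, pi
--
-- def generate_B_nondecreasing(k, max_gap, count_limit=100000):
--     """
--     Generate nondecreasing B sequences: B_0=0, 0 <= B_0 <= ... <= B_{k-1} <= max_gap.
--     Uses stars-and-bars enumeration.
--     """
--     # Method: enumerate via combinations with repetition
--     # A nondecreasing sequence b_0,...,b_{k-1} in {0,...,max_gap} with b_0=0
--     # is determined by choosing where each b_j falls.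
--     # Use recursive generation for bounded cases.
--     if k <= 0:
--         return [()]
--     if k == 1:
--         return [(0,)]
--
--     # For small cases, enumerate directly
--     total = comb(max_gap + k - 1, k - 1)
--     if total > count_limit:
--         return None
--
--     results = []
--
--     def gen(pos, prev_val, current):
--         if pos == k:
--             results.append(tuple(current))
--             return
--         for v in range(prev_val, max_gap + 1):
--             current.append(v)
--             gen(pos + 1, v, current)
--             current.pop()
--
--     gen(0, 0, [])
--     return results
-- ===== SOURCE B (Python) =====
-- from math import comb
--
-- def generate_B_nondecreasing(k, max_gap, count_limit=100000):
--     """Same guards and count check as A; then builds the sequences level by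
--     level (breadth-first): each pass extends every prefix by all allowed next
--     values, instead of a depth-first recursion."""
--     if k <= 0:
--         return [()]
--     if k == 1:
--         return [(0,)]
--     total = comb(max_gap + k - 1, k - 1)
--     if total > count_limit:
--         return None
--     prefixes = [()]
--     for _ in range(k):
--         if not prefixes:
--             break
--         prefixes = [p + (v,)
--                     for p in prefixes
--                     for v in range((p[-1] if p else 0), max_gap + 1)]
--     return prefixes
-- ===== Notes on version B (the rewrite author's own statement) =====
-- stated objective: alternative
-- what changed: Replaces the depth-first recursive generator (with an in-place mutated current list) by an iterative breadth-first construction that rebuilds the whole prefix list k times via a comprehension; guards and the comb count check are kept.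
import Mathlib
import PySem

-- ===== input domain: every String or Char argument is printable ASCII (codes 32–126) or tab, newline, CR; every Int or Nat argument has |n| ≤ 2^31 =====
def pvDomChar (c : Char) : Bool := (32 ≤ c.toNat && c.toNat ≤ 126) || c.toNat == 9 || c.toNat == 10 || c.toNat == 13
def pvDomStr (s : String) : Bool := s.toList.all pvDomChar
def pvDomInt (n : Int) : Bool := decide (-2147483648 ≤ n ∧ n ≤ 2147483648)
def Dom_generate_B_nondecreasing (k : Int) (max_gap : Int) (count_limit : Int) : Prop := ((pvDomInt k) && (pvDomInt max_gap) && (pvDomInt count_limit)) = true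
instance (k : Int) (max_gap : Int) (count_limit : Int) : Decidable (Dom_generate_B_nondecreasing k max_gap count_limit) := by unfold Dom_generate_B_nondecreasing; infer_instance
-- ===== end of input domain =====

-- B replaces A's depth-first recursive generator by an iterative breadth-first
-- prefix-list construction (alternative decomposition, same cost).


-- ===== PORT A =====
-- math.comb(n, k): exact multiplicative evaluation (acc = C(n,i) before step i,
-- so each division is exact); 0 for k > n. Shared by both ports.
def pyComb (n k : Nat) : Nat :=
  if n < k then 0
  else (List.range (min k (n - k))).foldl (fun acc i => acc * (n - i) / (i + 1)) 1

-- A's inner `def gen(pos, prev_val, current)`: recursion on the remaining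
-- length k - pos; the global `results` accumulation becomes concatenation.
def genA (max_gap : Int) : Nat → Int → List Int → List (List Int)
  | 0, _, current => [current]
  | n+1, prev_val, current =>
      (PySem.List.pyRange prev_val (max_gap + 1) 1).foldl
        (fun acc v => acc ++ genA max_gap n v (current ++ [v])) []

def generate_B_nondecreasing (k : Int) (max_gap : Int) (count_limit : Int) : Option (List (List Int)) :=
  if k ≤ 0 then some [[]]
  else if k = 1 then some [[0]]
  else
    -- math.comb(max_gap + k - 1, k - 1); Pre_ excludes the ValueError case max_gap + k - 1 < 0
    let total : Nat := pyComb (max_gap + k - 1).toNat (k - 1).toNat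
    if count_limit < (total : Int) then none
    else some (genA max_gap k.toNat 0 [])

-- ===== PORT B =====
-- B's comprehension: one breadth-first extension pass.
def stepB (max_gap : Int) (prefixes : List (List Int)) : List (List Int) :=
  prefixes.flatMap (fun p =>
    (PySem.List.pyRange (p.getLastD 0) (max_gap + 1) 1).map (fun v => p ++ [v]))

-- B's `for _ in range(k)` loop with its `if not prefixes: break` early exit,
-- as a countdown over the k iterations.
def buildB (max_gap : Int) : Nat → List (List Int) → List (List Int)
  | 0, P => P
  | n+1, P => if P = [] then [] else buildB max_gap n (stepB max_gap P)

def generate_B_nondecreasing_alt (k : Int) (max_gap : Int) (count_limit : Int) : Option (List (List Int)) :=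
  if k ≤ 0 then some [[]]
  else if k = 1 then some [[0]]
  else
    let total : Nat := pyComb (max_gap + k - 1).toNat (k - 1).toNat
    if count_limit < (total : Int) then none
    else some (buildB max_gap k.toNat [[]])

-- ===== PRECONDITION & SPEC =====
-- Cheap exact value (max_gap ≤ 3) / lower bound (max_gap ≥ 4) of
-- comb(max_gap+k-1, k-1), used only by Pre_ below (for k ≥ 998, k ≥ 0).
def pvTotalLB (k : Int) (max_gap : Int) : Int :=
  if max_gap ≤ 0 then 1
  else if max_gap = 1 then k
  else if max_gap = 2 then k * (k + 1) / 2
  else if max_gap = 3 then k * (k + 1) * (k + 2) / 6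
  else k * (k + 1) * (k + 2) * (k + 3) / 24

-- Pre_ excludes (1) the inputs where math.comb raises ValueError (k ≥ 2 and
-- max_gap + k - 1 < 0; both A and B raise there), and (2) enumerating calls with
-- k ≥ 998 (max_gap ≥ 0 and the stars-and-bars count within count_limit), where
-- A's depth-k recursion can exceed CPython's recursion limit (default 1000) and
-- raise RecursionError while B's iterative construction returns; the bound is
-- conservative since the exact threshold depends on the interpreter's limit, so
-- some inputs A returns on (under a raised limit) are also excluded.
def Pre_generate_B_nondecreasing (k : Int) (max_gap : Int) (count_limit : Int) : Prop :=
  (k ≤ 1 ∨ 0 ≤ max_gap + k - 1) ∧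
  (k < 998 ∨ max_gap < 0 ∨ count_limit < pvTotalLB k max_gap)
instance (k : Int) (max_gap : Int) (count_limit : Int) : Decidable (Pre_generate_B_nondecreasing k max_gap count_limit) := by unfold Pre_generate_B_nondecreasing; infer_instance

def pvWitness_generate_B_nondecreasing : Int × Int × Int := (3, 2, 100000)

def Spec_generate_B_nondecreasing (k : Int) (max_gap : Int) (count_limit : Int) (out : Option (List (List Int))) : Prop := out = generate_B_nondecreasing_alt k max_gap count_limit
instance (k : Int) (max_gap : Int) (count_limit : Int) (out : Option (List (List Int))) : Decidable (Spec_generate_B_nondecreasing k max_gap count_limit out) := by unfold Spec_generate_B_nondecreasing; infer_instance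

-- ===== CLAIM (what is proved, stated in full; the proofs are below) =====
def Claim_equal_generate_B_nondecreasing : Prop := ∀ (k : Int) (max_gap : Int) (count_limit : Int), Dom_generate_B_nondecreasing k max_gap count_limit → Pre_generate_B_nondecreasing k max_gap count_limit → Spec_generate_B_nondecreasing k max_gap count_limit (generate_B_nondecreasing k max_gap count_limit)

-- ===== LEMMAS AND PROOFS =====

theorem stepB_append (mg : Int) (xs ys : List (List Int)) :
    stepB mg (xs ++ ys) = stepB mg xs ++ stepB mg ys := by
  simp [stepB]

theorem map_eq_flatMap_singleton {α β : Type} (l : List α) (f : α → β) :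
    l.map f = l.flatMap (fun v => [f v]) := by
  induction l <;> simp_all

theorem stepB_flatMap (mg : Int) (l : List Int) (g : Int → List (List Int)) :
    stepB mg (l.flatMap g) = l.flatMap (fun v => stepB mg (g v)) := by
  induction l with
  | nil => simp [stepB]
  | cons x xs ihx => simp [List.flatMap_cons, stepB_append, ihx]

theorem stepB_iterate_flatMap (mg : Int) (n : Nat) (l : List Int) (g : Int → List (List Int)) :
    (stepB mg)^[n] (l.flatMap g) = l.flatMap (fun v => (stepB mg)^[n] (g v)) := by
  induction n generalizing g with
  | zero => simp
  | succ n ih => simp only [Function.iterate_succ_apply, stepB_flatMap, ih]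

-- A's DFS with remaining length n equals n breadth-first steps from the single prefix.
theorem genA_eq_iterate (mg : Int) (n : Nat) (prev : Int) (cur : List Int)
    (h : prev = cur.getLastD 0) :
    genA mg n prev cur = (stepB mg)^[n] [cur] := by
  induction n generalizing prev cur with
  | zero => simp [genA]
  | succ n ih =>
      rw [genA, PySem.List.foldl_append_eq_flatMap, List.nil_append,
          Function.iterate_succ_apply]
      have hstep : stepB mg [cur] =
          (PySem.List.pyRange prev (mg + 1) 1).flatMap (fun v => [cur ++ [v]]) := by
        simp only [stepB, List.flatMap_cons, List.flatMap_nil, List.append_nil, h]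
        exact map_eq_flatMap_singleton _ _
      rw [hstep, stepB_iterate_flatMap]
      refine List.flatMap_congr (fun v _ => ?_)
      exact ih v (cur ++ [v]) (by simp)

theorem stepB_iterate_nil (mg : Int) (n : Nat) : (stepB mg)^[n] [] = [] := by
  induction n with
  | zero => rfl
  | succ n ih => rw [Function.iterate_succ_apply]; simpa [stepB] using ih

theorem buildB_eq_iterate (mg : Int) (n : Nat) (P : List (List Int)) :
    buildB mg n P = (stepB mg)^[n] P := by
  induction n generalizing P with
  | zero => rfl
  | succ n ih =>
      rw [buildB, Function.iterate_succ_apply]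
      by_cases h : P = []
      · subst h; simp [stepB, stepB_iterate_nil]
      · simp [h, ih]

-- ===== VERDICT (by name: the statement is the Claim_ definition above) =====
theorem generate_B_nondecreasing_spec : Claim_equal_generate_B_nondecreasing := by
  intro k max_gap count_limit _ _
  unfold Spec_generate_B_nondecreasing generate_B_nondecreasing generate_B_nondecreasing_alt
  split_ifs with h1 h2
  · rfl
  · rfl
  · have hX : genA max_gap k.toNat 0 [] = buildB max_gap k.toNat [[]] := by
      rw [genA_eq_iterate max_gap k.toNat 0 [] (by simp), buildB_eq_iterate]
    simp only [hX]
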